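-- pv_equiv track=rewrite | github.com/vais05/Design-and-Analysis-of-Algorithms-AIE22131- | AIE22131_LAB5_Q_2.py | maximumPeople
-- ===== SOURCE A (Python) =====
-- def maximumPeople(p, x, y, r):
--     events = []
--     for i, town_pos in enumerate(x):
--         # Mark the start and end of town influence with population
--         events.append((town_pos, 'start', p[i]))
--         events.append((town_pos, 'end', p[i]))
--     for i, cloud_pos in enumerate(y):
--         # Mark the start and end of cloud coverage
--         events.append((cloud_pos - r[i], 'cloud_start', i))
--         events.append((cloud_pos + r[i], 'cloud_end', i))
--
--     events.sort()  # Sort events based on position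
--
--     current_clouds = set()
--     cloud_cover = [0] * len(y)  # Population covered by each cloud
--     sunny_population = 0
--     for event in events:
--         pos, event_type, value = event
--         if event_type == 'start':
--             if not current_clouds:  # If no clouds, it's sunny
--                 sunny_population += value
--             elif len(current_clouds) == 1:  # If one cloud, add population to that cloud's cover
--                 cloud_cover[list(current_clouds)[0]] += value
--         elif event_type == 'end':
--             continue  # End of town influence, not needed for logic
--         elif event_type == 'cloud_start':
--             current_clouds.add(value)
--         elif event_type == 'cloud_end':
--             current_clouds.remove(value)
--
--     # Find the cloud covering the maximum population
--     max_covered_by_single_cloud = max(cloud_cover)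
--     return sunny_population + max_covered_by_single_cloud
-- ===== SOURCE B (Python) =====
-- def maximumPeople(p, x, y, r):
--     # Direct per-town scan: no event list, no sort, no running cloud set.
--     cloud_cover = [0] * len(y)
--     sunny = 0
--     for i, pos in enumerate(x):
--         cnt = 0
--         last = -1
--         for j in range(len(y)):
--             if y[j] - r[j] <= pos < y[j] + r[j]:
--                 cnt += 1
--                 last = j
--         if cnt == 0:
--             sunny += p[i]
--         elif cnt == 1:
--             cloud_cover[last] += p[i]
--     return sunny + max(cloud_cover)
-- ===== Notes on version B (the rewrite author's own statement) =====
-- stated objective: simpler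
-- what changed: Replaces the event-list/sort/sweep-line with running cloud set by a direct per-town scan over the clouds that counts covering clouds (left-inclusive, right-exclusive) and remembers the single covering cloud's index.
import Mathlib
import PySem

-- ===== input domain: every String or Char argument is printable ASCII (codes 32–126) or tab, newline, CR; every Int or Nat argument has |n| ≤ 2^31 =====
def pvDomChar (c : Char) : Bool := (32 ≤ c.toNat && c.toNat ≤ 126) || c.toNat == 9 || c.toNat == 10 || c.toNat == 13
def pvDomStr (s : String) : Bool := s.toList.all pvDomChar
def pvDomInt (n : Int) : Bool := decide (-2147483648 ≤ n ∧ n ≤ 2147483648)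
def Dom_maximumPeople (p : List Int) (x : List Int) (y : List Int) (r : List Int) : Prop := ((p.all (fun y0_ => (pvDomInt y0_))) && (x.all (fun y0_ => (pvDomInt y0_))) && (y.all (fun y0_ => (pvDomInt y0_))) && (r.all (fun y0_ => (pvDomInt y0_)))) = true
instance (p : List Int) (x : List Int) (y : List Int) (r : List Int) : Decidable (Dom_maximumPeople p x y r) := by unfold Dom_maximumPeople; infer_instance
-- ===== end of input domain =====

-- B replaces A's event-list/sort/sweep-line by a direct per-town scan over the clouds (simpler, no sort).


-- ===== PORT A =====
-- Python tuple comparison on (pos, type-string, value): lexicographic.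
def pvKey (e : Int × String × Int) : Lex (Int × Lex (String × Int)) := toLex (e.1, toLex e.2)

-- events list built exactly as A builds it (two appends per town, two per cloud)
def pvEventsA (p : List Int) (x : List Int) (y : List Int) (r : List Int) : List (Int × String × Int) :=
  let ev1 := (PySem.List.enumerate x).foldl
    (fun acc it => (acc ++ [(it.2, "start", PySem.List.pyGetD p it.1 0)]) ++ [(it.2, "end", PySem.List.pyGetD p it.1 0)]) []
  (PySem.List.enumerate y).foldl
    (fun acc it => (acc ++ [(it.2 - PySem.List.pyGetD r it.1 0, "cloud_start", it.1)]) ++ [(it.2 + PySem.List.pyGetD r it.1 0, "cloud_end", it.1)]) ev1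

-- one iteration of A's event loop; state = (current_clouds, cloud_cover, sunny_population).
-- list(current_clouds)[0] is taken on a singleton set only (guarded by len == 1), where it is its sole
-- element, independent of Python's hash order; set.remove is ported as discard (total) — within Pre_ the
-- element is always present, exactly where Python's remove does not raise.
def pvStepA (st : PySem.Set Int × List Int × Int) (ev : Int × String × Int) : PySem.Set Int × List Int × Int :=
  if ev.2.1 = "start" then
    if st.1 = [] then (st.1, st.2.1, st.2.2 + ev.2.2)
    else if PySem.Set.len st.1 = 1 then
      (st.1, PySem.List.pySetD st.2.1 (PySem.List.pyGetD st.1 0 0)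
        (PySem.List.pyGetD st.2.1 (PySem.List.pyGetD st.1 0 0) 0 + ev.2.2), st.2.2)
    else st
  else if ev.2.1 = "end" then st
  else if ev.2.1 = "cloud_start" then (PySem.Set.add st.1 ev.2.2, st.2.1, st.2.2)
  else if ev.2.1 = "cloud_end" then (PySem.Set.discard st.1 ev.2.2, st.2.1, st.2.2)
  else st

def maximumPeople (p : List Int) (x : List Int) (y : List Int) (r : List Int) : Int :=
  let events := PySem.List.sorted (pvEventsA p x y r) pvKey
  let final := events.foldl pvStepA (PySem.Set.empty, List.replicate y.length 0, 0)
  final.2.2 + (PySem.List.max? final.2.1 (fun v => v)).getD 0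

-- ===== PORT B =====
-- inner scan of Source B: count clouds covering pos, remember the last covering index
def pvInnerB (y : List Int) (r : List Int) (pos : Int) : Int × Int :=
  (PySem.List.pyRange 0 (PySem.List.len y) 1).foldl
    (fun s j =>
      if PySem.List.pyGetD y j 0 - PySem.List.pyGetD r j 0 ≤ pos ∧
         pos < PySem.List.pyGetD y j 0 + PySem.List.pyGetD r j 0 then (s.1 + 1, j) else s)
    (0, -1)

-- body of Source B's outer loop: classify town `it` by the count/last pair of the inner scan
def pvStepB (p y r : List Int) (st : Int × List Int) (it : Int × Int) : Int × List Int :=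
  let c := pvInnerB y r it.2
  if c.1 = 0 then (st.1 + PySem.List.pyGetD p it.1 0, st.2)
  else if c.1 = 1 then
    (st.1, PySem.List.pySetD st.2 c.2 (PySem.List.pyGetD st.2 c.2 0 + PySem.List.pyGetD p it.1 0))
  else st

def maximumPeople_alt (p : List Int) (x : List Int) (y : List Int) (r : List Int) : Int :=
  let final := (PySem.List.enumerate x).foldl (pvStepB p y r) (0, List.replicate y.length 0)
  final.1 + (PySem.List.max? final.2 (fun v => v)).getD 0

-- ===== PRECONDITION & SPEC =====
-- Pre_ excludes exactly the inputs on which the Python A raises: len(x) > len(p) or len(y) > len(r)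
-- (IndexError), y = [] (ValueError from max([])), and a non-positive radius among the first len(y)
-- radii (the cloud's end event sorts before its start event and set.remove raises KeyError).
def Pre_maximumPeople (p : List Int) (x : List Int) (y : List Int) (r : List Int) : Prop :=
  x.length ≤ p.length ∧ y.length ≤ r.length ∧ y ≠ [] ∧ ∀ a ∈ r.take y.length, 1 ≤ a
instance (p : List Int) (x : List Int) (y : List Int) (r : List Int) : Decidable (Pre_maximumPeople p x y r) := by unfold Pre_maximumPeople; infer_instance

def pvWitness_maximumPeople : List Int × List Int × List Int × List Int := ([1], [5], [4], [2])

def Spec_maximumPeople (p : List Int) (x : List Int) (y : List Int) (r : List Int) (out : Int) : Prop := out = maximumPeople_alt p x y r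
instance (p : List Int) (x : List Int) (y : List Int) (r : List Int) (out : Int) : Decidable (Spec_maximumPeople p x y r out) := by unfold Spec_maximumPeople; infer_instance

-- ===== CLAIM (what is proved, stated in full; the proofs are below) =====
def Claim_equal_maximumPeople : Prop := ∀ (p : List Int) (x : List Int) (y : List Int) (r : List Int), Dom_maximumPeople p x y r → Pre_maximumPeople p x y r → Spec_maximumPeople p x y r (maximumPeople p x y r)

-- ===== LEMMAS AND PROOFS =====

-- the interval test both programs decide: cloud j covers position t
abbrev pvCov (y : List Int) (r : List Int) (t : Int) (j : Int) : Prop :=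
  PySem.List.pyGetD y j 0 - PySem.List.pyGetD r j 0 ≤ t ∧ t < PySem.List.pyGetD y j 0 + PySem.List.pyGetD r j 0

-- the covering clouds of position t, as the increasing list of indices
def pvCovL (y : List Int) (r : List Int) (t : Int) : List Int :=
  (PySem.List.pyRange 0 ((y.length : Int)) 1).filter (fun j => decide (pvCov y r t j))

-- (position, population) pairs of the towns
def pvTw (p : List Int) (x : List Int) : List (Int × Int) :=
  (PySem.List.enumerate x).map (fun it => (it.2, PySem.List.pyGetD p it.1 0))

def pvSunny (y : List Int) (r : List Int) (tw : List (Int × Int)) : Int :=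
  (tw.map (fun tv => if pvCovL y r tv.1 = [] then tv.2 else 0)).sum

def pvCover (y : List Int) (r : List Int) (tw : List (Int × Int)) (j : Int) : Int :=
  (tw.map (fun tv => if pvCovL y r tv.1 = [j] then tv.2 else 0)).sum

theorem pvKey_lt_iff (a b : Int × String × Int) :
    pvKey a < pvKey b ↔
      a.1 < b.1 ∨ (a.1 = b.1 ∧ (a.2.1 < b.2.1 ∨ (a.2.1 = b.2.1 ∧ a.2.2 < b.2.2))) := by
  simp [pvKey, Prod.Lex.lt_iff]

theorem pvKey_inj : Function.Injective pvKey := by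
  intro a b h
  simp only [pvKey] at h
  rcases a with ⟨a1, a2, a3⟩; rcases b with ⟨b1, b2, b3⟩
  simpa [Prod.ext_iff] using h

theorem pv_mem_split {α κ : Type} [LinearOrder κ] (key : α → κ) (hinj : Function.Injective key)
    {S pre suf : List α} {ev a : α} (hS : S = pre ++ ev :: suf)
    (hpw : S.Pairwise (fun u v => key u ≤ key v)) (ha : a ∈ S) (hne : a ≠ ev) :
    a ∈ pre ↔ key a < key ev := by
  subst hS
  rw [List.pairwise_append] at hpw
  constructor
  · intro hp
    have hle : key a ≤ key ev := hpw.2.2 a hp ev (List.mem_cons_self ..)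
    exact lt_of_le_of_ne hle (fun h => hne (hinj h))
  · intro hlt
    rcases List.mem_append.1 ha with h | h
    · exact h
    · rcases List.mem_cons.1 h with h' | h'
      · exact absurd h' hne
      · have : key ev ≤ key a := (List.pairwise_cons.1 hpw.2.1).1 a h'
        exact absurd hlt (not_lt.2 this)

theorem pv_foldl_two {α β : Type} (f g : α → β) (l : List α) (acc : List β) :
    l.foldl (fun acc x => (acc ++ [f x]) ++ [g x]) acc = acc ++ l.flatMap (fun x => [f x, g x]) := by
  induction l generalizing acc with
  | nil => simp
  | cons a t ih =>
      simp only [List.foldl_cons, List.flatMap_cons, ih]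
      simp

theorem pvEventsA_eq (p x y r : List Int) :
    pvEventsA p x y r =
      (PySem.List.enumerate x).flatMap
        (fun it => [(it.2, "start", PySem.List.pyGetD p it.1 0), (it.2, "end", PySem.List.pyGetD p it.1 0)])
      ++ (PySem.List.enumerate y).flatMap
        (fun it => [(it.2 - PySem.List.pyGetD r it.1 0, "cloud_start", it.1),
                    (it.2 + PySem.List.pyGetD r it.1 0, "cloud_end", it.1)]) := by
  unfold pvEventsA
  rw [pv_foldl_two, pv_foldl_two]
  simp

def pvCs (y r : List Int) (k : Int) : Int × String × Int :=
  (PySem.List.pyGetD y k 0 - PySem.List.pyGetD r k 0, "cloud_start", k)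
def pvCe (y r : List Int) (k : Int) : Int × String × Int :=
  (PySem.List.pyGetD y k 0 + PySem.List.pyGetD r k 0, "cloud_end", k)

theorem pv_mem_events {p x y r : List Int} {ev : Int × String × Int} :
    ev ∈ pvEventsA p x y r ↔
      (∃ i : Int, 0 ≤ i ∧ i < x.length ∧
        (ev = (PySem.List.pyGetD x i 0, "start", PySem.List.pyGetD p i 0) ∨
         ev = (PySem.List.pyGetD x i 0, "end", PySem.List.pyGetD p i 0)))
      ∨ (∃ i : Int, 0 ≤ i ∧ i < y.length ∧ (ev = pvCs y r i ∨ ev = pvCe y r i)) := by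
  rw [pvEventsA_eq]
  simp only [List.mem_append, List.mem_flatMap, PySem.List.mem_enumerate_iff]
  constructor
  · rintro (⟨it, ⟨k, hk, hit⟩, hev⟩ | ⟨it, ⟨k, hk, hit⟩, hev⟩)
    · refine Or.inl ⟨(k : Int), by positivity, by exact_mod_cast hk, ?_⟩
      subst hit
      simp only [zero_add, List.mem_cons, List.not_mem_nil, or_false] at hev
      simp only [PySem.List.pyGetD_natCast, List.getD_eq_getElem?_getD, List.getElem?_eq_getElem hk,
        Option.getD_some] at hev ⊢
      exact hev
    · refine Or.inr ⟨(k : Int), by positivity, by exact_mod_cast hk, ?_⟩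
      subst hit
      simp only [zero_add, List.mem_cons, List.not_mem_nil, or_false] at hev
      simp only [pvCs, pvCe, PySem.List.pyGetD_natCast, List.getD_eq_getElem?_getD,
        List.getElem?_eq_getElem hk, Option.getD_some] at hev ⊢
      exact hev
  · rintro (⟨i, h0, hi, hev⟩ | ⟨i, h0, hi, hev⟩)
    · have hk : i.toNat < x.length := by omega
      refine Or.inl ⟨((i.toNat : Int), x[i.toNat]), ⟨i.toNat, hk, by simp⟩, ?_⟩
      have hcast : i = (i.toNat : Int) := by omega
      rw [hcast] at hev
      have hx : PySem.List.pyGetD x ((i.toNat : Int)) 0 = x[i.toNat] := by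
        rw [PySem.List.pyGetD_natCast]; exact List.getD_eq_getElem x 0 hk
      rcases hev with h | h <;> rw [h, hx] <;> simp
    · have hk : i.toNat < y.length := by omega
      refine Or.inr ⟨((i.toNat : Int), y[i.toNat]), ⟨i.toNat, hk, by simp⟩, ?_⟩
      have hcast : i = (i.toNat : Int) := by omega
      rw [hcast] at hev
      have hy : PySem.List.pyGetD y ((i.toNat : Int)) 0 = y[i.toNat] := by
        rw [PySem.List.pyGetD_natCast]; exact List.getD_eq_getElem y 0 hk
      rcases hev with h | h <;> rw [h] <;> simp only [pvCs, pvCe] <;> rw [hy] <;> simp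
theorem pv_mem_covL {y r : List Int} {t k : Int} :
    k ∈ pvCovL y r t ↔ 0 ≤ k ∧ k < (y.length : Int) ∧ pvCov y r t k := by
  simp [pvCovL, List.mem_filter, PySem.List.mem_pyRange_one, and_assoc]

theorem pv_nodup_covL (y r : List Int) (t : Int) : (pvCovL y r t).Nodup :=
  (PySem.List.nodup_pyRange_one 0 _).filter _

-- town events of an event-list prefix
def pvTownsOf (l : List (Int × String × Int)) : List (Int × Int) :=
  l.filterMap (fun ev => if ev.2.1 = "start" then some (ev.1, ev.2.2) else none)

theorem pvTownsOf_append (l₁ l₂ : List (Int × String × Int)) :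
    pvTownsOf (l₁ ++ l₂) = pvTownsOf l₁ ++ pvTownsOf l₂ := by
  simp [pvTownsOf, List.filterMap_append]

theorem pvTownsOf_town (l : List (Int × Int)) (f : Int × Int → Int) :
    pvTownsOf (l.flatMap (fun it => [(it.2, "start", f it), (it.2, "end", f it)]))
      = l.map (fun it => (it.2, f it)) := by
  induction l with
  | nil => rfl
  | cons a tl ih =>
      simp only [List.flatMap_cons, pvTownsOf, List.filterMap_append, List.filterMap_cons] at ih ⊢
      simp at ih ⊢
      exact ih

theorem pvTownsOf_cloud (l : List (Int × Int)) (g h : Int × Int → Int) :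
    pvTownsOf (l.flatMap (fun it => [(g it, "cloud_start", it.1), (h it, "cloud_end", it.1)])) = [] := by
  induction l with
  | nil => rfl
  | cons a tl ih =>
      simp only [List.flatMap_cons, pvTownsOf, List.filterMap_append, List.filterMap_cons] at ih ⊢
      simp at ih ⊢
      exact ih

theorem pvTownsOf_events (p x y r : List Int) :
    pvTownsOf (pvEventsA p x y r) = pvTw p x := by
  rw [pvEventsA_eq, pvTownsOf_append, pvTownsOf_town, pvTownsOf_cloud, pvTw]
  simp

theorem pvSunny_append (y r : List Int) (tw : List (Int × Int)) (tv : Int × Int) :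
    pvSunny y r (tw ++ [tv]) = pvSunny y r tw + (if pvCovL y r tv.1 = [] then tv.2 else 0) := by
  simp [pvSunny]

theorem pvCover_append (y r : List Int) (tw : List (Int × Int)) (tv : Int × Int) (j : Int) :
    pvCover y r (tw ++ [tv]) j = pvCover y r tw j + (if pvCovL y r tv.1 = [j] then tv.2 else 0) := by
  simp [pvCover]

theorem pvSunny_perm (y r : List Int) {tw tw' : List (Int × Int)} (h : tw.Perm tw') :
    pvSunny y r tw = pvSunny y r tw' := by
  exact List.Perm.sum_eq (h.map _)

theorem pvCover_perm (y r : List Int) {tw tw' : List (Int × Int)} (h : tw.Perm tw') (j : Int) :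
    pvCover y r tw j = pvCover y r tw' j := by
  exact List.Perm.sum_eq (h.map _)

-- updating the j-th entry of a tabulated list
theorem pv_bump (g : Int → Int) (n : Nat) (j v : Int) (h0 : 0 ≤ j) (hj : j < (n : Int)) :
    PySem.List.pySetD ((List.range n).map (fun k : Nat => g (k : Int))) j
      (PySem.List.pyGetD ((List.range n).map (fun k : Nat => g (k : Int))) j 0 + v)
    = (List.range n).map (fun k : Nat => g (k : Int) + if (k : Int) = j then v else 0) := by
  have hcast : j = (j.toNat : Int) := by omega
  have hjn : j.toNat < n := by omega
  rw [hcast, PySem.List.pySetD_natCast, PySem.List.pyGetD_natCast]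
  have hget : (((List.range n).map (fun k : Nat => g (k : Int))).getD j.toNat 0) = g ((j.toNat : Int)) :=
    PySem.List.getD_map_range _ n j.toNat 0 hjn
  rw [hget]
  apply List.ext_getElem
  · simp
  · intro i hi1 hi2
    simp only [List.length_set, List.length_map, List.length_range] at hi1
    rw [List.getElem_set]
    simp only [List.getElem_map, List.getElem_range]
    by_cases hij : j.toNat = i
    · subst hij; simp
    · simp only [hij, if_false]
      simp
      intro h
      exfalso
      omega
-- the same three facts on the underlying character lists (the form simp normalises String `<` to)
theorem pvS1' : (['c','l','o','u','d','_','s','t','a','r','t'] : List Char) < ['s','t','a','r','t'] := by decide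
theorem pvS2' : (['c','l','o','u','d','_','e','n','d'] : List Char) < ['s','t','a','r','t'] := by decide
theorem pvS4' : (['e','n','d'] : List Char) < ['s','t','a','r','t'] := by decide

-- key-order corollaries of the tuple comparison
theorem pv_cs_lt_start (y r : List Int) (k t v : Int) :
    pvKey (pvCs y r k) < pvKey (t, "start", v) ↔
      PySem.List.pyGetD y k 0 - PySem.List.pyGetD r k 0 ≤ t := by
  rw [pvKey_lt_iff]; simp [pvCs, pvS1']; omega

theorem pv_ce_lt_start (y r : List Int) (k t v : Int) :
    pvKey (pvCe y r k) < pvKey (t, "start", v) ↔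
      PySem.List.pyGetD y k 0 + PySem.List.pyGetD r k 0 ≤ t := by
  rw [pvKey_lt_iff]; simp [pvCe, pvS2']; omega

theorem pv_ce_lt_cs (y r : List Int) (k i : Int) :
    pvKey (pvCe y r k) < pvKey (pvCs y r i) ↔
      PySem.List.pyGetD y k 0 + PySem.List.pyGetD r k 0 ≤
        PySem.List.pyGetD y i 0 - PySem.List.pyGetD r i 0 := by
  rw [pvKey_lt_iff]; simp [pvCs, pvCe, pvS4']; omega

theorem pv_cs_mem_events (p x y r : List Int) {k : Int} (h0 : 0 ≤ k) (hk : k < (y.length : Int)) :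
    pvCs y r k ∈ pvEventsA p x y r :=
  pv_mem_events.2 (Or.inr ⟨k, h0, hk, Or.inl rfl⟩)

theorem pv_ce_mem_events (p x y r : List Int) {k : Int} (h0 : 0 ≤ k) (hk : k < (y.length : Int)) :
    pvCe y r k ∈ pvEventsA p x y r :=
  pv_mem_events.2 (Or.inr ⟨k, h0, hk, Or.inr rfl⟩)

theorem pv_r_pos (y r : List Int) (hlen : y.length ≤ r.length)
    (hr : ∀ a ∈ r.take y.length, 1 ≤ a) {i : Int} (h0 : 0 ≤ i) (hi : i < (y.length : Int)) :
    1 ≤ PySem.List.pyGetD r i 0 := by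
  have hiy : i.toNat < y.length := by omega
  have hir : i.toNat < r.length := by omega
  have hcast : i = (i.toNat : Int) := by omega
  rw [hcast, PySem.List.pyGetD_natCast, List.getD_eq_getElem r 0 hir]
  have hmem : r[i.toNat] ∈ r.take y.length := by
    have : (r.take y.length)[i.toNat]'(by simp; omega) = r[i.toNat] := List.getElem_take
    exact this ▸ List.getElem_mem _
  exact hr _ hmem

-- the loop invariant of A's sweep: after the events of `pre` have been processed,
-- the state is (active clouds of pre, per-cloud covered population of pre's towns, sunny population of pre's towns)
def pvInv (y r : List Int) (pre : List (Int × String × Int))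
    (st : PySem.Set Int × List Int × Int) : Prop :=
  st.1.Nodup ∧
  (∀ k : Int, k ∈ st.1 ↔
    (0 ≤ k ∧ k < (y.length : Int) ∧ pvCs y r k ∈ pre ∧ pvCe y r k ∉ pre)) ∧
  st.2.2 = pvSunny y r (pvTownsOf pre) ∧
  st.2.1 = (List.range y.length).map (fun j : Nat => pvCover y r (pvTownsOf pre) (j : Int))

theorem pv_step (p x y r : List Int)
    (hrpos : ∀ k : Int, 0 ≤ k → k < (y.length : Int) → 1 ≤ PySem.List.pyGetD r k 0)
    {pre suf : List (Int × String × Int)} {ev : Int × String × Int}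
    {st : PySem.Set Int × List Int × Int}
    (hS : PySem.List.sorted (pvEventsA p x y r) pvKey = pre ++ ev :: suf)
    (hinv : pvInv y r pre st) :
    pvInv y r (pre ++ [ev]) (pvStepA st ev) := by
  have hpw := PySem.List.sorted_pairwise (pvEventsA p x y r) pvKey
  have hperm := PySem.List.sorted_perm (pvEventsA p x y r) pvKey false
  have hevS : ev ∈ PySem.List.sorted (pvEventsA p x y r) pvKey := by
    rw [hS]; exact List.mem_append.2 (Or.inr (List.mem_cons_self ..))
  have hevE : ev ∈ pvEventsA p x y r := hperm.subset hevS
  obtain ⟨hnd, hmem, hsun, hcov⟩ := hinv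
  rcases pv_mem_events.1 hevE with ⟨i, h0, hi, hev | hev⟩ | ⟨i, h0, hi, hev | hev⟩
  · -- start event
    subst hev
    set t := PySem.List.pyGetD x i 0 with ht
    set v := PySem.List.pyGetD p i 0 with hv
    have hcur : ∀ k : Int, (k ∈ st.1 ↔ k ∈ pvCovL y r t) := by
      intro k
      rw [hmem k, pv_mem_covL]
      constructor
      · rintro ⟨hk0, hkn, hcsp, hcep⟩
        refine ⟨hk0, hkn, ?_, ?_⟩
        · have hcsS : pvCs y r k ∈ PySem.List.sorted (pvEventsA p x y r) pvKey :=
            hperm.mem_iff.2 (pv_cs_mem_events p x y r hk0 hkn)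
          have hlt := (pv_mem_split pvKey pvKey_inj hS hpw hcsS (by simp [pvCs])).1 hcsp
          exact (pv_cs_lt_start y r k t v).1 hlt
        · have hceS : pvCe y r k ∈ PySem.List.sorted (pvEventsA p x y r) pvKey :=
            hperm.mem_iff.2 (pv_ce_mem_events p x y r hk0 hkn)
          by_contra hcon
          have hcon2 : PySem.List.pyGetD y k 0 + PySem.List.pyGetD r k 0 ≤ t := by omega
          exact hcep ((pv_mem_split pvKey pvKey_inj hS hpw hceS (by simp [pvCe])).2
            ((pv_ce_lt_start y r k t v).2 hcon2))
      · rintro ⟨hk0, hkn, hc1, hc2⟩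
        have hcsS : pvCs y r k ∈ PySem.List.sorted (pvEventsA p x y r) pvKey :=
          hperm.mem_iff.2 (pv_cs_mem_events p x y r hk0 hkn)
        have hceS : pvCe y r k ∈ PySem.List.sorted (pvEventsA p x y r) pvKey :=
          hperm.mem_iff.2 (pv_ce_mem_events p x y r hk0 hkn)
        refine ⟨hk0, hkn, ?_, ?_⟩
        · exact (pv_mem_split pvKey pvKey_inj hS hpw hcsS (by simp [pvCs])).2
            ((pv_cs_lt_start y r k t v).2 hc1)
        · intro hcep
          have := (pv_mem_split pvKey pvKey_inj hS hpw hceS (by simp [pvCe])).1 hcep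
          have := (pv_ce_lt_start y r k t v).1 this
          omega
    have hperm2 : st.1.Perm (pvCovL y r t) :=
      (List.perm_ext_iff_of_nodup hnd (pv_nodup_covL y r t)).2 hcur
    have htw : pvTownsOf (pre ++ [(t, "start", v)]) = pvTownsOf pre ++ [(t, v)] := by
      rw [pvTownsOf_append]; simp [pvTownsOf]
    have hmem' : ∀ k : Int,
        (pvCs y r k ∈ pre ++ [(t, "start", v)] ↔ pvCs y r k ∈ pre) ∧
        (pvCe y r k ∈ pre ++ [(t, "start", v)] ↔ pvCe y r k ∈ pre) := by
      intro k; constructor <;> simp [pvCs, pvCe]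
    rcases hL : pvCovL y r t with _ | ⟨j, rest⟩
    · -- no cloud covers t: town is sunny
      have hc : st.1 = [] := by
        have := hL ▸ hperm2
        exact this.eq_nil
      simp only [pvStepA]
      rw [if_pos trivial, if_pos hc]
      refine ⟨hnd, ?_, ?_, ?_⟩
      · intro k
        rw [hmem k, (hmem' k).1, (hmem' k).2]
      · rw [htw, pvSunny_append, hsun]
        simp [hL]
      · rw [htw, hcov]
        apply List.map_congr_left
        intro jn _
        rw [pvCover_append]
        simp [hL]
    · rcases rest with _ | ⟨j2, rest2⟩
      · -- exactly one cloud covers t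
        have hc : st.1 = [j] := by
          have := hL ▸ hperm2
          exact List.perm_singleton.1 this
        have hjb : 0 ≤ j ∧ j < (y.length : Int) := by
          have : j ∈ pvCovL y r t := by rw [hL]; exact List.mem_cons_self ..
          have := pv_mem_covL.1 this
          exact ⟨this.1, this.2.1⟩
        simp only [pvStepA]
        rw [if_pos trivial, if_neg (show ¬(st.1 = []) by simp [hc]),
          if_pos (show PySem.Set.len st.1 = 1 by simp [PySem.Set.len, hc])]
        have hget0 : PySem.List.pyGetD st.1 0 0 = j := by
          rw [hc]; exact PySem.List.pyGetD_zero_cons ..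
        refine ⟨hnd, ?_, ?_, ?_⟩
        · intro k
          rw [hmem k, (hmem' k).1, (hmem' k).2]
        · rw [htw, pvSunny_append, hsun]
          simp [hL]
        · rw [htw, hget0, hcov,
            pv_bump (fun z => pvCover y r (pvTownsOf pre) z) y.length j v hjb.1 hjb.2]
          apply List.map_congr_left
          intro jn _
          rw [pvCover_append]
          simp only [hL]
          by_cases hje : (jn : Int) = j
          · simp [hje]
          · have : ¬ ([j] = [(jn : Int)]) := by simp; omega
            simp [hje, this]
      · -- two or more clouds cover t: town counts for nobody
        have hlen : st.1.length = rest2.length + 2 := by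
          have := hperm2.length_eq
          rw [hL] at this
          simpa using this
        simp only [pvStepA]
        rw [if_pos trivial, if_neg (show ¬(st.1 = []) by intro h; rw [h] at hlen; simp at hlen),
          if_neg (show ¬(PySem.Set.len st.1 = 1) by simp [PySem.Set.len, hlen]; omega)]
        refine ⟨hnd, ?_, ?_, ?_⟩
        · intro k
          rw [hmem k, (hmem' k).1, (hmem' k).2]
        · rw [htw, pvSunny_append, hsun]
          simp [hL]
        · rw [htw, hcov]
          apply List.map_congr_left
          intro jn _
          rw [pvCover_append]
          simp [hL]
  · -- end event
    subst hev
    set t := PySem.List.pyGetD x i 0 with ht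
    set v := PySem.List.pyGetD p i 0 with hv
    show pvInv y r (pre ++ [(t, "end", v)]) st
    have htw : pvTownsOf (pre ++ [(t, "end", v)]) = pvTownsOf pre := by
      rw [pvTownsOf_append]; simp [pvTownsOf]
    refine ⟨hnd, ?_, ?_, ?_⟩
    · intro k
      rw [hmem k]
      have h1 : (pvCs y r k ∈ pre ++ [(t, "end", v)]) ↔ pvCs y r k ∈ pre := by simp [pvCs]
      have h2 : (pvCe y r k ∈ pre ++ [(t, "end", v)]) ↔ pvCe y r k ∈ pre := by simp [pvCe]
      rw [h1, h2]
    · rw [htw]; exact hsun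
    · rw [htw]; exact hcov
  · -- cloud_start event
    subst hev
    show pvInv y r (pre ++ [pvCs y r i]) (PySem.Set.add st.1 i, st.2.1, st.2.2)
    have hnin : pvCe y r i ∉ pre := by
      intro hcep
      have hceS : pvCe y r i ∈ PySem.List.sorted (pvEventsA p x y r) pvKey :=
        hperm.mem_iff.2 (pv_ce_mem_events p x y r h0 hi)
      have hlt := (pv_mem_split pvKey pvKey_inj hS hpw hceS (by simp [pvCs, pvCe])).1 hcep
      have h1 := (pv_ce_lt_cs y r i i).1 hlt
      have h2 := hrpos i h0 hi
      omega
    have htw : pvTownsOf (pre ++ [pvCs y r i]) = pvTownsOf pre := by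
      rw [pvTownsOf_append]; simp [pvTownsOf, pvCs]
    refine ⟨PySem.Set.nodup_add st.1 i hnd, ?_, ?_, ?_⟩
    · intro k
      rw [PySem.Set.mem_add, hmem k]
      by_cases hki : k = i
      · subst hki
        constructor
        · intro _
          refine ⟨h0, hi, by simp, ?_⟩
          intro hce
          rcases List.mem_append.1 hce with h | h
          · exact hnin h
          · simp [pvCs, pvCe] at h
        · intro _
          exact Or.inr rfl
      · have h1 : (pvCs y r k ∈ pre ++ [pvCs y r i]) ↔ pvCs y r k ∈ pre := by
          simp [pvCs, Prod.ext_iff, hki]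
        have h2 : (pvCe y r k ∈ pre ++ [pvCs y r i]) ↔ pvCe y r k ∈ pre := by
          simp [pvCs, pvCe]
        rw [h1, h2]
        simp [hki]
    · rw [htw]; exact hsun
    · rw [htw]; exact hcov
  · -- cloud_end event
    subst hev
    show pvInv y r (pre ++ [pvCe y r i]) (PySem.Set.discard st.1 i, st.2.1, st.2.2)
    have htw : pvTownsOf (pre ++ [pvCe y r i]) = pvTownsOf pre := by
      rw [pvTownsOf_append]; simp [pvTownsOf, pvCe]
    refine ⟨PySem.Set.nodup_discard st.1 i hnd, ?_, ?_, ?_⟩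
    · intro k
      rw [PySem.Set.mem_discard, hmem k]
      by_cases hki : k = i
      · subst hki
        have hce : pvCe y r k ∈ pre ++ [pvCe y r k] := by simp
        simp [hce]
      · have h1 : (pvCs y r k ∈ pre ++ [pvCe y r i]) ↔ pvCs y r k ∈ pre := by
          simp [pvCs, pvCe]
        have h2 : (pvCe y r k ∈ pre ++ [pvCe y r i]) ↔ pvCe y r k ∈ pre := by
          simp [pvCe, Prod.ext_iff, hki]
        rw [h1, h2]
        simp [hki]
    · rw [htw]; exact hsun
    · rw [htw]; exact hcov
theorem pv_master (p x y r : List Int)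
    (hrpos : ∀ k : Int, 0 ≤ k → k < (y.length : Int) → 1 ≤ PySem.List.pyGetD r k 0) :
    ∀ (suf pre : List (Int × String × Int)) (st : PySem.Set Int × List Int × Int),
      PySem.List.sorted (pvEventsA p x y r) pvKey = pre ++ suf →
      pvInv y r pre st →
      pvInv y r (PySem.List.sorted (pvEventsA p x y r) pvKey) (suf.foldl pvStepA st) := by
  intro suf
  induction suf with
  | nil =>
      intro pre st hS hinv
      rw [List.foldl_nil, hS, List.append_nil]
      exact hinv
  | cons ev suf ih =>
      intro pre st hS hinv
      rw [List.foldl_cons]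
      exact ih (pre ++ [ev]) (pvStepA st ev) (by rw [hS]; simp)
        (pv_step p x y r hrpos hS hinv)

theorem pv_init (y r : List Int) :
    pvInv y r [] (PySem.Set.empty, List.replicate y.length 0, 0) := by
  refine ⟨List.nodup_nil, ?_, ?_, ?_⟩
  · intro k; simp [PySem.Set.empty]
  · simp [pvSunny, pvTownsOf]
  · simp [pvTownsOf, pvCover, List.map_const']

theorem pv_A_eq (p x y r : List Int) (hlen : y.length ≤ r.length)
    (hr : ∀ a ∈ r.take y.length, 1 ≤ a) :
    maximumPeople p x y r =
      pvSunny y r (pvTw p x) +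
      (PySem.List.max? ((List.range y.length).map
          (fun j : Nat => pvCover y r (pvTw p x) (j : Int))) (fun v => v)).getD 0 := by
  have hrpos : ∀ k : Int, 0 ≤ k → k < (y.length : Int) → 1 ≤ PySem.List.pyGetD r k 0 :=
    fun k h0 hk => pv_r_pos y r hlen hr h0 hk
  have hfin := pv_master p x y r hrpos (PySem.List.sorted (pvEventsA p x y r) pvKey) []
    (PySem.Set.empty, List.replicate y.length 0, 0) rfl (pv_init y r)
  obtain ⟨-, -, hsun, hcov⟩ := hfin
  have hperm := PySem.List.sorted_perm (pvEventsA p x y r) pvKey false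
  have htperm : (pvTownsOf (PySem.List.sorted (pvEventsA p x y r) pvKey)).Perm (pvTw p x) := by
    have h := hperm.filterMap (fun ev : Int × String × Int =>
      if ev.2.1 = "start" then some (ev.1, ev.2.2) else none)
    rw [← pvTownsOf_events p x y r]
    exact h
  show (PySem.List.sorted (pvEventsA p x y r) pvKey).foldl pvStepA
      (PySem.Set.empty, List.replicate y.length 0, 0) |>.2.2 + _ = _
  have hmapeq : List.map (fun j : Nat =>
        pvCover y r (pvTownsOf (PySem.List.sorted (pvEventsA p x y r) pvKey)) (j : Int))
        (List.range y.length)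
      = List.map (fun j : Nat => pvCover y r (pvTw p x) (j : Int)) (List.range y.length) :=
    List.map_congr_left (fun jn _ => pvCover_perm y r htperm (jn : Int))
  rw [hsun, hcov, pvSunny_perm y r htperm, hmapeq]

theorem pvSunny_cons (y r : List Int) (tv : Int × Int) (tw : List (Int × Int)) :
    pvSunny y r (tv :: tw) = (if pvCovL y r tv.1 = [] then tv.2 else 0) + pvSunny y r tw := by
  simp [pvSunny]

theorem pvCover_cons (y r : List Int) (tv : Int × Int) (tw : List (Int × Int)) (j : Int) :
    pvCover y r (tv :: tw) j = (if pvCovL y r tv.1 = [j] then tv.2 else 0) + pvCover y r tw j := by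
  simp [pvCover]

theorem pv_cnt_last (l : List Int) (q : Int → Prop) [DecidablePred q] (c0 l0 : Int) :
    l.foldl (fun s j => if q j then (s.1 + 1, j) else s) (c0, l0)
      = (c0 + ((l.filter (fun j => decide (q j))).length : Int),
         (l.filter (fun j => decide (q j))).foldl (fun _ j => j) l0) := by
  induction l generalizing c0 l0 with
  | nil => simp
  | cons a tl ih =>
      by_cases h : q a
      · rw [List.foldl_cons, if_pos h]
        rw [ih (c0 + 1) a]
        simp [h]
        omega
      · rw [List.foldl_cons, if_neg h]
        rw [ih c0 l0]
        simp [h]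

theorem pv_innerB_eq (y r : List Int) (t : Int) :
    pvInnerB y r t
      = (((pvCovL y r t).length : Int), (pvCovL y r t).foldl (fun _ j => j) (-1)) := by
  unfold pvInnerB pvCovL
  rw [pv_cnt_last _ (fun j => PySem.List.pyGetD y j 0 - PySem.List.pyGetD r j 0 ≤ t ∧
    t < PySem.List.pyGetD y j 0 + PySem.List.pyGetD r j 0) 0 (-1)]
  simp [pvCov, PySem.List.len_eq]
theorem pv_B_fold (p y r : List Int) :
    ∀ (E : List (Int × Int)) (s0 : Int) (g : Int → Int),
    E.foldl (pvStepB p y r)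
      (s0, (List.range y.length).map (fun k : Nat => g (k : Int)))
    = (s0 + pvSunny y r (E.map (fun it => (it.2, PySem.List.pyGetD p it.1 0))),
       (List.range y.length).map (fun k : Nat =>
         g (k : Int) + pvCover y r (E.map (fun it => (it.2, PySem.List.pyGetD p it.1 0))) (k : Int))) := by
  intro E
  induction E with
  | nil => intro s0 g; simp [pvSunny, pvCover]
  | cons a E ih =>
      intro s0 g
      rw [List.foldl_cons]
      rcases hL : pvCovL y r a.2 with _ | ⟨j, rest⟩
      · have hc : pvInnerB y r a.2 = (0, -1) := by
          rw [pv_innerB_eq, hL]; rfl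
        have hstep : pvStepB p y r (s0, (List.range y.length).map (fun k : Nat => g (k : Int))) a
            = (s0 + PySem.List.pyGetD p a.1 0,
               (List.range y.length).map (fun k : Nat => g (k : Int))) := by
          unfold pvStepB; rw [hc]; norm_num
        rw [hstep, ih (s0 + PySem.List.pyGetD p a.1 0) g]
        refine Prod.ext ?_ ?_
        · simp [pvSunny_cons, hL]
          ring
        · simp only [List.map_cons]
          apply List.map_congr_left
          intro k _
          rw [pvCover_cons]
          simp [hL]
      · rcases rest with _ | ⟨j2, rest2⟩
        · have hc : pvInnerB y r a.2 = (1, j) := by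
            rw [pv_innerB_eq, hL]; rfl
          have hjb := pv_mem_covL.1 (show j ∈ pvCovL y r a.2 by
            rw [hL]; exact List.mem_cons_self ..)
          have hstep : pvStepB p y r (s0, (List.range y.length).map (fun k : Nat => g (k : Int))) a
              = (s0, PySem.List.pySetD ((List.range y.length).map (fun k : Nat => g (k : Int))) j
                  (PySem.List.pyGetD ((List.range y.length).map (fun k : Nat => g (k : Int))) j 0 +
                    PySem.List.pyGetD p a.1 0)) := by
            unfold pvStepB; rw [hc]; norm_num
          rw [hstep, pv_bump g y.length j (PySem.List.pyGetD p a.1 0) hjb.1 hjb.2.1]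
          have h2 := ih s0 (fun z => g z + if z = j then PySem.List.pyGetD p a.1 0 else 0)
          simp only at h2
          rw [h2]
          refine Prod.ext ?_ ?_
          · simp only [List.map_cons, pvSunny_cons, hL]
            simp
          · simp only [List.map_cons]
            apply List.map_congr_left
            intro k _
            rw [pvCover_cons]
            simp only [hL]
            by_cases hk : (k : Int) = j
            · simp [hk]
              ring
            · have hne : ¬([j] = [(k : Int)]) := by simp; omega
              simp [hk, hne]
        · rcases hcp : pvInnerB y r a.2 with ⟨c1, c2⟩
          have h := pv_innerB_eq y r a.2
          rw [hcp, hL] at h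
          have hc1 : c1 = (((j :: j2 :: rest2).length : Nat) : Int) := by
            injection h with h1 h2
          have h0 : c1 ≠ 0 := by rw [hc1]; push_cast [List.length_cons]; omega
          have h1 : c1 ≠ 1 := by rw [hc1]; push_cast [List.length_cons]; omega
          have hstep : pvStepB p y r (s0, (List.range y.length).map (fun k : Nat => g (k : Int))) a
              = (s0, (List.range y.length).map (fun k : Nat => g (k : Int))) := by
            unfold pvStepB; rw [hcp]; norm_num [h0, h1]
          rw [hstep, ih s0 g]
          refine Prod.ext ?_ ?_
          · simp only [List.map_cons, pvSunny_cons, hL]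
            simp
          · simp only [List.map_cons]
            apply List.map_congr_left
            intro k _
            rw [pvCover_cons]
            simp [hL]

theorem pv_B_eq (p x y r : List Int) :
    maximumPeople_alt p x y r =
      pvSunny y r (pvTw p x) +
      (PySem.List.max? ((List.range y.length).map
        (fun j : Nat => pvCover y r (pvTw p x) (j : Int))) (fun v => v)).getD 0 := by
  unfold maximumPeople_alt
  rw [show (List.replicate y.length (0:Int))
      = (List.range y.length).map (fun k : Nat => (fun _ : Int => (0:Int)) (k : Int)) from by
    simp [List.map_const']]
  rw [pv_B_fold p y r (PySem.List.enumerate x) 0 (fun _ : Int => (0:Int))]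
  simp [pvTw]
-- ===== VERDICT (by name: the statement is the Claim_ definition above) =====
theorem maximumPeople_spec : Claim_equal_maximumPeople := by
  intro p x y r _ hpre
  obtain ⟨hpx, hyr, hy, hr⟩ := hpre
  show maximumPeople p x y r = maximumPeople_alt p x y r
  rw [pv_A_eq p x y r hyr hr, pv_B_eq p x y r]
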